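-- pv_equiv track=rewrite | github.com/JunkerMeister/lab7 | zd_2.py | find_end_count
-- ===== SOURCE A (Python) =====
-- def find_max_substring(word):
--     max_count = 0
--     max_substring = ""
--
--     for i in range(len(word)):
--         for j in range(i+1, len(word)+1):
--             substring = word[i:j]
--             count = word.count(substring)
--             if count > max_count or (count >= max_count and len(substring) > len(max_substring)):
--                 max_count = count
--                 max_substring = substring
--
--     return max_substring
--
-- def find_end_count(wr):
--     substr = find_max_substring(wr)
--     ans = list(wr.replace(substr, '*'))
--     end_count = 0
--     cur_count = 0
--     for h in ans:
--         if h == '*':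
--             cur_count += 1
--             end_count = max(end_count, cur_count)
--         else:
--             cur_count = 0
--     return end_count
-- ===== SOURCE B (Python) =====
-- def find_end_count(wr):
--     n = len(wr)
--     best = ""
--     best_count = 0
--     for L in range(1, n + 1):
--         # index every distinct substring of length L by its occurrence positions
--         occ = {}
--         for i in range(n - L + 1):
--             occ.setdefault(wr[i:i + L], []).append(i)
--         for s, ps in occ.items():
--             # greedy non-overlapping count from the sorted position list
--             cnt = 0
--             nxt = 0
--             for p in ps:
--                 if p >= nxt:
--                     cnt += 1
--                     nxt = p + L
--             if cnt > best_count or (cnt == best_count and L > len(best)):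
--                 best = s
--                 best_count = cnt
--     end_count = 0
--     cur_count = 0
--     for h in wr.replace(best, '*'):
--         if h == '*':
--             cur_count += 1
--             end_count = max(end_count, cur_count)
--         else:
--             cur_count = 0
--     return end_count
-- ===== Notes on version B (the rewrite author's own statement) =====
-- stated objective: faster
-- what changed: Instead of re-counting every one of the ~n^2/2 (start,end) substrings with a fresh O(n*L) string scan, B groups, per length L, the occurrence positions of each distinct substring into a hash map in one sliding pass and derives each non-overlapping count by a linear greedy sweep over the stored position list; the final star-run scan is unchanged.
import Mathlib
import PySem

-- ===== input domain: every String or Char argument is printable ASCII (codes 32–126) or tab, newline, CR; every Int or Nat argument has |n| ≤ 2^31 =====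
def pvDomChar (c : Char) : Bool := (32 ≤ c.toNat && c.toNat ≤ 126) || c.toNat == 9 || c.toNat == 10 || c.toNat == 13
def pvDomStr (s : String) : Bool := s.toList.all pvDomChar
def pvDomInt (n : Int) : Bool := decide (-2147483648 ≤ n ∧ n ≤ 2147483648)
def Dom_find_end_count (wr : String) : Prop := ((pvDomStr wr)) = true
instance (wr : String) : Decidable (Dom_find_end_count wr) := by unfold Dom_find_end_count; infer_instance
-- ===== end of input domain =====

-- B replaces A's per-(start,end) recounting of every substring by a per-length hash index of the
-- occurrence positions of each distinct substring, each count derived by one greedy sweep (faster).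

-- ===== PORT A =====
def find_max_substring (word : List Char) : List Char :=
  ((PySem.List.pyRange 0 (word.length : Int)).foldl (fun (st : Int × List Char) i =>
      (PySem.List.pyRange (i + 1) ((word.length : Int) + 1)).foldl (fun (st : Int × List Char) j =>
        let substring := PySem.List.slice word (some i) (some j)
        let count : Int := ((PySem.Chars.count word substring : ℕ) : Int)
        if count > st.1 ∨ (count ≥ st.1 ∧ substring.length > st.2.length) then
          (count, substring) else st) st)
    ((0 : Int), ([] : List Char))).2

def find_end_count (wr : String) : Int :=
  let substr := find_max_substring wr.toList
  let ans := PySem.Chars.replace wr.toList substr ['*']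
  (ans.foldl (fun (st : Int × Int) h =>
      if h = '*' then (max st.1 (st.2 + 1), st.2 + 1) else (st.1, 0))
    ((0 : Int), (0 : Int))).1

-- ===== PORT B =====
def find_end_count_alt (wr : String) : Int :=
  let w := wr.toList
  let n : Int := w.length
  let best := ((PySem.List.pyRange 1 (n + 1)).foldl (fun (st : List Char × Int) L =>
      let occ := (PySem.List.pyRange 0 (n - L + 1)).foldl
        (fun (d : PySem.Dict (List Char) (List Int)) i =>
          d.modify (PySem.List.slice w (some i) (some (i + L))) [] (fun v => v ++ [i]))
        PySem.Dict.empty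
      occ.items.foldl (fun (st : List Char × Int) sp =>
        let c := sp.2.foldl (fun (cn : Int × Int) p =>
          if p ≥ cn.2 then (cn.1 + 1, p + L) else cn) ((0 : Int), (0 : Int))
        if c.1 > st.2 ∨ (c.1 = st.2 ∧ L > (st.1.length : Int)) then (sp.1, c.1) else st) st)
    (([] : List Char), (0 : Int))).1
  ((PySem.Chars.replace w best ['*']).foldl (fun (st : Int × Int) h =>
      if h = '*' then (max st.1 (st.2 + 1), st.2 + 1) else (st.1, 0))
    ((0 : Int), (0 : Int))).1

-- ===== PRECONDITION & SPEC =====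
def Spec_find_end_count (wr : String) (out : Int) : Prop := out = find_end_count_alt wr
instance (wr : String) (out : Int) : Decidable (Spec_find_end_count wr out) := by unfold Spec_find_end_count; infer_instance

-- ===== CLAIM (what is proved, stated in full; the proofs are below) =====
def Claim_equal_find_end_count : Prop := ∀ (wr : String), Dom_find_end_count wr → Spec_find_end_count wr (find_end_count wr)

-- ===== LEMMAS AND PROOFS =====

/-! Shared abbreviations -/

def pvSeg (w : List Char) (i j : Int) : List Char := PySem.List.slice w (some i) (some j)

/-- Lexicographic score of a candidate substring: (non-overlapping count, length). -/
def pvKap (w s : List Char) : Lex (ℕ × ℕ) := toLex (PySem.Chars.count w s, s.length)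

def pvKeyA (st : Int × List Char) : Lex (ℕ × ℕ) := toLex (st.1.toNat, st.2.length)

def pvKeyB (st : List Char × Int) : Lex (ℕ × ℕ) := toLex (st.2.toNat, st.1.length)

/-- Keyed strict-improvement step: both phase-1 loops are folds of this shape. -/
def pvGstep {α K : Type} [LinearOrder K] (key : α → K) (a x : α) : α :=
  if key a < key x then x else a

def pvCandA (w : List Char) (i j : Int) : Int × List Char :=
  (((PySem.Chars.count w (pvSeg w i j) : ℕ) : Int), pvSeg w i j)

def pvLA (w : List Char) : List (Int × List Char) :=
  (PySem.List.pyRange 0 (w.length : Int)).flatMap (fun i =>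
    (PySem.List.pyRange (i + 1) ((w.length : Int) + 1)).map (fun j => pvCandA w i j))

def pvWinN (w : List Char) (l : ℕ) : List (List Char) :=
  (List.range (w.length - l + 1)).map (fun i : ℕ => pvSeg w (i : Int) ((i : Int) + (l : Int)))

def pvCandB (w k : List Char) : List Char × Int :=
  (k, ((PySem.Chars.count w k : ℕ) : Int))

def pvLB (w : List Char) : List (List Char × Int) :=
  (PySem.List.pyRange 1 ((w.length : Int) + 1)).flatMap (fun L =>
    (PySem.Set.ofList (pvWinN w L.toNat)).map (pvCandB w))

def pvFpos (w s : List Char) : ℕ := (PySem.Chars.find w s).toNat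

def pvGr (L : Int) (cn : Int × Int) (p : Int) : Int × Int :=
  if p ≥ cn.2 then (cn.1 + 1, p + L) else cn

def pvGrN (L : Int) (cn : Int × Int) (i : ℕ) : Int × Int := pvGr L cn (i : Int)

def pvOccs (w sub : List Char) : List ℕ :=
  (List.range (w.length - sub.length + 1)).filter
    (fun i : ℕ => pvSeg w (i : Int) ((i : Int) + (sub.length : Int)) == sub)

/-- The fold body of A's inner loop, named for the proofs. -/
def pvAinner (w : List Char) (i : Int) (st : Int × List Char) (j : Int) : Int × List Char :=
  let substring := PySem.List.slice w (some i) (some j)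
  let count : Int := ((PySem.Chars.count w substring : ℕ) : Int)
  if count > st.1 ∨ (count ≥ st.1 ∧ substring.length > st.2.length) then
    (count, substring) else st

/-- The per-length position dictionary built by B. -/
def pvBdict (w : List Char) (L : Int) : PySem.Dict (List Char) (List Int) :=
  (PySem.List.pyRange 0 ((w.length : Int) - L + 1)).foldl
    (fun (d : PySem.Dict (List Char) (List Int)) i =>
      d.modify (PySem.List.slice w (some i) (some (i + L))) [] (fun v => v ++ [i]))
    PySem.Dict.empty

/-- The fold body of B's per-item loop, named for the proofs. -/
def pvBitem (L : Int) (st : List Char × Int) (sp : List Char × List Int) : List Char × Int :=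
  let c := sp.2.foldl (fun (cn : Int × Int) p =>
    if p ≥ cn.2 then (cn.1 + 1, p + L) else cn) ((0 : Int), (0 : Int))
  if c.1 > st.2 ∨ (c.1 = st.2 ∧ L > (st.1.length : Int)) then (sp.1, c.1) else st

/-- The shared phase 2 (replace by '*', longest star run). -/
def pvPhase2 (w best : List Char) : Int :=
  ((PySem.Chars.replace w best ['*']).foldl (fun (st : Int × Int) h =>
      if h = '*' then (max st.1 (st.2 + 1), st.2 + 1) else (st.1, 0))
    ((0 : Int), (0 : Int))).1

def pvStA (w : List Char) : Int × List Char :=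
  List.foldl (pvGstep pvKeyA) ((0 : Int), ([] : List Char)) (pvLA w)

def pvStB (w : List Char) : List Char × Int :=
  List.foldl (pvGstep pvKeyB) (([] : List Char), (0 : Int)) (pvLB w)

/-! Lex order helpers -/

theorem pv_lex_lt (a b c d : ℕ) :
    toLex (a, b) < toLex (c, d) ↔ a < c ∨ (a = c ∧ b < d) := Prod.Lex.toLex_lt_toLex

theorem pv_lex_le (a b c d : ℕ) :
    toLex (a, b) ≤ toLex (c, d) ↔ a < c ∨ (a = c ∧ b ≤ d) := Prod.Lex.toLex_le_toLex

theorem pv_lex_inj {a b c d : ℕ} (h : toLex (a, b) = toLex (c, d)) : a = c ∧ b = d := by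
  have h2 : (a, b) = (c, d) := toLex.injective h
  exact ⟨congrArg Prod.fst h2, congrArg Prod.snd h2⟩

/-! Generic facts about keyed strict-improvement folds -/

theorem pv_g_mem {α K : Type} [LinearOrder K] (key : α → K) (l : List α) (a : α) :
    List.foldl (pvGstep key) a l ∈ a :: l := by
  induction l generalizing a with
  | nil => simp
  | cons x t ih =>
    have h := ih (pvGstep key a x)
    rw [List.foldl_cons]
    rcases List.mem_cons.mp h with h | h
    · rw [h]
      unfold pvGstep
      split <;> simp
    · simp only [List.mem_cons]
      exact Or.inr (Or.inr h)

theorem pv_g_step_le_left {α K : Type} [LinearOrder K] (key : α → K) (a x : α) :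
    key a ≤ key (pvGstep key a x) := by
  unfold pvGstep; split
  · exact le_of_lt (by assumption)
  · exact le_refl _

theorem pv_g_step_le_right {α K : Type} [LinearOrder K] (key : α → K) (a x : α) :
    key x ≤ key (pvGstep key a x) := by
  unfold pvGstep; split
  · exact le_refl _
  · exact le_of_not_gt (by assumption)

theorem pv_g_pos {α K : Type} [LinearOrder K] (key : α → K) {a x : α}
    (h : key a < key x) : pvGstep key a x = x := by
  unfold pvGstep; rw [if_pos h]

theorem pv_g_neg {α K : Type} [LinearOrder K] (key : α → K) {a x : α}
    (h : ¬ key a < key x) : pvGstep key a x = a := by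
  unfold pvGstep; rw [if_neg h]

theorem pv_g_max0 {α K : Type} [LinearOrder K] (key : α → K) (l : List α) (a : α) :
    key a ≤ key (List.foldl (pvGstep key) a l) := by
  induction l generalizing a with
  | nil => simp
  | cons x t ih =>
    rw [List.foldl_cons]
    exact le_trans (pv_g_step_le_left key a x) (ih (pvGstep key a x))

theorem pv_g_max {α K : Type} [LinearOrder K] (key : α → K) (l : List α) (a : α)
    {x : α} (hx : x ∈ l) :
    key x ≤ key (List.foldl (pvGstep key) a l) := by
  induction l generalizing a with
  | nil => cases hx
  | cons y t ih =>
    rw [List.foldl_cons]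
    rcases List.mem_cons.mp hx with h | h
    · subst h
      exact le_trans (pv_g_step_le_right key a x) (pv_g_max0 key t _)
    · exact ih _ h

theorem pv_g_stable {α K : Type} [LinearOrder K] (key : α → K) (l : List α) (b : α)
    (h : ∀ y ∈ l, key y ≤ key b) :
    List.foldl (pvGstep key) b l = b := by
  induction l with
  | nil => rfl
  | cons y t ih =>
    have hy : key y ≤ key b := h y (by simp)
    have hstep : pvGstep key b y = b := by
      unfold pvGstep
      rw [if_neg (not_lt.mpr hy)]
    rw [List.foldl_cons, hstep]
    exact ih (fun z hz => h z (by simp [hz]))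

theorem pv_g_first {α K : Type} [LinearOrder K] (key : α → K) (a x : α) (l₁ l₂ : List α)
    (hk : key (List.foldl (pvGstep key) a (l₁ ++ x :: l₂)) ≤ key x) :
    List.foldl (pvGstep key) a (l₁ ++ x :: l₂)
      = pvGstep key (List.foldl (pvGstep key) a l₁) x := by
  have hsplit : List.foldl (pvGstep key) a (l₁ ++ x :: l₂)
      = List.foldl (pvGstep key) (pvGstep key (List.foldl (pvGstep key) a l₁) x) l₂ := by
    rw [List.foldl_append, List.foldl_cons]
  rw [hsplit]
  apply pv_g_stable
  intro y hy
  have h1 : key y ≤ key (List.foldl (pvGstep key) a (l₁ ++ x :: l₂)) :=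
    pv_g_max key _ a (by simp [hy])
  calc key y ≤ key x := le_trans h1 hk
    _ ≤ key (pvGstep key (List.foldl (pvGstep key) a l₁) x) := pv_g_step_le_right key _ x

theorem pv_foldl_congr_inv {α β : Type} (P : β → Prop) (f g : β → α → β) (l : List α) (a : β)
    (ha : P a) (h : ∀ b x, x ∈ l → P b → f b x = g b x ∧ P (f b x)) :
    List.foldl f a l = List.foldl g a l ∧ P (List.foldl f a l) := by
  induction l generalizing a with
  | nil => exact ⟨rfl, ha⟩
  | cons x t ih =>
    have hx := h a x (by simp) ha
    have ht := ih (f a x) hx.2 (fun b y hy hb => h b y (by simp [hy]) hb)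
    refine ⟨?_, ?_⟩
    · rw [List.foldl_cons, List.foldl_cons, ← hx.1, ht.1]
    · rw [List.foldl_cons]; exact ht.2

theorem pv_foldl_flat {α β γ : Type} (g : β → γ → β) (h : α → List γ) (l : List α) (a : β) :
    List.foldl (fun st i => List.foldl g st (h i)) a l = List.foldl g a (l.flatMap h) := by
  induction l generalizing a with
  | nil => rfl
  | cons x t ih => simp only [List.foldl_cons, List.flatMap_cons, List.foldl_append, ih]

/-! Slices, occurrences, first occurrence -/

theorem pv_seg_nat (w : List Char) (i j : ℕ) :
    pvSeg w (i : Int) (j : Int) = (w.drop i).take (j - i) := by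
  unfold pvSeg
  rw [PySem.List.slice_natCast]

theorem pv_seg_props (w : List Char) (i j : ℕ) (hij : i < j) (hj : j ≤ w.length) :
    (pvSeg w (i : Int) (j : Int)).length = j - i ∧
    pvSeg w (i : Int) (j : Int) <+: w.drop i ∧
    pvSeg w (i : Int) (j : Int) ≠ [] := by
  rw [pv_seg_nat]
  refine ⟨?_, List.take_prefix _ _, ?_⟩
  · rw [List.length_take, List.length_drop]
    omega
  · intro hnil
    have hlen := congrArg List.length hnil
    rw [List.length_take, List.length_drop, List.length_nil] at hlen
    omega

theorem pv_occ_infix {w s : List Char} {k : ℕ} (h : s <+: w.drop k) : s <:+: w :=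
  List.IsInfix.trans h.isInfix (List.drop_suffix k w).isInfix

theorem pv_occ_len {w s : List Char} {k : ℕ} (h : s <+: w.drop k) (hs : s ≠ []) :
    k + s.length ≤ w.length := by
  have h1 := h.length_le
  rw [List.length_drop] at h1
  have h2 : 0 < s.length := List.length_pos_iff.mpr hs
  omega

theorem pv_fpos_le {w s : List Char} {k : ℕ} (h : s <+: w.drop k) : pvFpos w s ≤ k := by
  have hinf : s <:+: w := pv_occ_infix h
  have hnn : 0 ≤ PySem.Chars.find w s := (PySem.Chars.find_nonneg_iff w s).mpr hinf
  have hspec := PySem.Chars.find_spec hnn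
  by_contra hlt
  exact hspec.2 k (by unfold pvFpos at hlt; omega) h

theorem pv_fpos_occ {w s : List Char} (h : s <:+: w) : s <+: w.drop (pvFpos w s) :=
  (PySem.Chars.find_spec ((PySem.Chars.find_nonneg_iff w s).mpr h)).1

theorem pv_sub_canon {w s : List Char} (h : s <:+: w) :
    s = (w.drop (pvFpos w s)).take s.length :=
  List.prefix_iff_eq_take.mp (pv_fpos_occ h)

theorem pv_seg_of_occ {w s : List Char} {k : ℕ} (h : s <+: w.drop k) :
    pvSeg w (k : Int) ((k + s.length : ℕ) : Int) = s := by
  rw [pv_seg_nat]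
  have h2 : k + s.length - k = s.length := by omega
  rw [h2]
  exact (List.prefix_iff_eq_take.mp h).symm

/-! Membership in the flattened candidate lists -/

theorem pv_LA_mem {w : List Char} {e : Int × List Char} :
    e ∈ pvLA w ↔ ∃ i j : Int, 0 ≤ i ∧ i < j ∧ j ≤ (w.length : Int) ∧ e = pvCandA w i j := by
  unfold pvLA
  simp only [List.mem_flatMap, List.mem_map, PySem.List.mem_pyRange_one]
  constructor
  · rintro ⟨i, ⟨hi0, hin⟩, j, ⟨hj1, hj2⟩, rfl⟩
    exact ⟨i, j, hi0, by omega, by omega, rfl⟩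
  · rintro ⟨i, j, h0, hij, hjn, rfl⟩
    exact ⟨i, ⟨h0, by omega⟩, j, ⟨by omega, by omega⟩, rfl⟩

theorem pv_win_mem {w k : List Char} {l : ℕ} :
    k ∈ pvWinN w l ↔ ∃ i : ℕ, i < w.length - l + 1 ∧ k = pvSeg w (i : Int) ((i : Int) + (l : Int)) := by
  unfold pvWinN
  simp only [List.mem_map, List.mem_range]
  constructor
  · rintro ⟨i, hi, rfl⟩; exact ⟨i, hi, rfl⟩
  · rintro ⟨i, hi, rfl⟩; exact ⟨i, hi, rfl⟩

theorem pv_win_props {w k : List Char} {l : ℕ} (hl : 1 ≤ l) (hn : l ≤ w.length)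
    (hk : k ∈ pvWinN w l) :
    k.length = l ∧ k ≠ [] ∧ k <:+: w := by
  rcases pv_win_mem.mp hk with ⟨i, hi, hkeq⟩
  have hcast : ((i : Int) + (l : Int)) = ((i + l : ℕ) : Int) := by push_cast; ring
  rw [hcast] at hkeq
  have hprops := pv_seg_props w i (i + l) (by omega) (by omega)
  subst hkeq
  exact ⟨by omega, hprops.2.2, pv_occ_infix hprops.2.1⟩

theorem pv_sub_win {w s : List Char} (hs : s ≠ []) (hsub : s <:+: w) :
    s ∈ pvWinN w s.length := by
  have hocc := pv_fpos_occ hsub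
  have hlen := pv_occ_len hocc hs
  have hlp : 0 < s.length := List.length_pos_iff.mpr hs
  apply pv_win_mem.mpr
  refine ⟨pvFpos w s, by omega, ?_⟩
  have hcast : ((pvFpos w s : Int) + (s.length : Int)) = ((pvFpos w s + s.length : ℕ) : Int) := by
    push_cast; ring
  rw [hcast, pv_seg_of_occ hocc]

theorem pv_LB_mem {w : List Char} {e : List Char × Int} :
    e ∈ pvLB w ↔ ∃ (l : ℕ) (k : List Char),
      1 ≤ l ∧ l ≤ w.length ∧ k ∈ pvWinN w l ∧ e = pvCandB w k := by
  unfold pvLB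
  simp only [List.mem_flatMap, List.mem_map, PySem.List.mem_pyRange_one]
  constructor
  · rintro ⟨L, ⟨hL1, hL2⟩, k, hk, rfl⟩
    refine ⟨L.toNat, k, by omega, by omega, ?_, rfl⟩
    rwa [PySem.Set.mem_ofList] at hk
  · rintro ⟨l, k, hl1, hl2, hk, rfl⟩
    refine ⟨(l : Int), ⟨by omega, by omega⟩, k, ?_, rfl⟩
    rw [Int.toNat_natCast, PySem.Set.mem_ofList]
    exact hk

/-! Candidate keys -/

theorem pv_keyA_cand (w : List Char) (i j : Int) :
    pvKeyA (pvCandA w i j) = pvKap w (pvSeg w i j) := by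
  unfold pvKeyA pvCandA pvKap
  simp

theorem pv_keyB_cand (w k : List Char) :
    pvKeyB (pvCandB w k) = pvKap w k := by
  unfold pvKeyB pvCandB pvKap
  simp

/-! ### The greedy sweep over a sorted position list computes Python's str.count -/

theorem pv_go_zero (sub l : List Char) (acc : ℕ) :
    PySem.Chars.count.go sub 0 l acc = acc := by
  rw [PySem.Chars.count.go.eq_def]

theorem pv_go_nil (sub : List Char) (fuel acc : ℕ) :
    PySem.Chars.count.go sub fuel [] acc = acc := by
  rw [PySem.Chars.count.go.eq_def]
  cases fuel <;> rfl

theorem pv_go_cons (sub : List Char) (f : ℕ) (c : Char) (t : List Char) (acc : ℕ) :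
    PySem.Chars.count.go sub (f + 1) (c :: t) acc =
      if sub.isPrefixOf (c :: t) then
        PySem.Chars.count.go sub f (List.drop sub.length (c :: t)) (acc + 1)
      else PySem.Chars.count.go sub f t acc := by
  rw [PySem.Chars.count.go.eq_def]

theorem pv_go_acc (sub : List Char) :
    ∀ (fuel : ℕ) (l : List Char) (acc : ℕ),
      PySem.Chars.count.go sub fuel l acc = acc + PySem.Chars.count.go sub fuel l 0 := by
  intro fuel
  induction fuel with
  | zero => intro l acc; rw [pv_go_zero, pv_go_zero]; omega
  | succ f ih =>
    intro l acc
    cases l with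
    | nil => rw [pv_go_nil, pv_go_nil]; omega
    | cons c t =>
      rw [pv_go_cons, pv_go_cons]
      split
      · rw [ih _ (acc + 1), ih _ (0 + 1)]; omega
      · exact ih t acc

theorem pv_go_fuel (sub : List Char) (hsub : sub ≠ []) :
    ∀ (fuel₁ fuel₂ : ℕ) (l : List Char) (acc : ℕ), l.length ≤ fuel₁ → l.length ≤ fuel₂ →
      PySem.Chars.count.go sub fuel₁ l acc = PySem.Chars.count.go sub fuel₂ l acc := by
  intro fuel₁
  induction fuel₁ with
  | zero =>
    intro fuel₂ l acc h1 _
    have : l = [] := List.length_eq_zero_iff.mp (by omega)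
    subst this
    rw [pv_go_nil, pv_go_nil]
  | succ f ih =>
    intro fuel₂ l acc h1 h2
    cases l with
    | nil => rw [pv_go_nil, pv_go_nil]
    | cons c t =>
      cases fuel₂ with
      | zero => simp at h2
      | succ f2 =>
        rw [pv_go_cons, pv_go_cons]
        have hsl : 1 ≤ sub.length := by
          cases sub with
          | nil => exact absurd rfl hsub
          | cons x xs => simp
        split
        · apply ih
          · simp only [List.length_drop, List.length_cons] at *; omega
          · simp only [List.length_drop, List.length_cons] at *; omega
        · apply ih
          · simp only [List.length_cons] at h1; omega
          · simp only [List.length_cons] at h2; omega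

theorem pv_occs_mem {w sub : List Char} {p : ℕ} :
    p ∈ pvOccs w sub ↔
      p < w.length - sub.length + 1 ∧
      pvSeg w (p : Int) ((p : Int) + (sub.length : Int)) = sub := by
  unfold pvOccs
  simp only [List.mem_filter, List.mem_range, beq_iff_eq]

theorem pv_occs_occ {w sub : List Char} {p : ℕ} (hp : p ∈ pvOccs w sub) :
    sub <+: w.drop p := by
  obtain ⟨_, hseg⟩ := pv_occs_mem.mp hp
  have hcast : ((p : Int) + (sub.length : Int)) = ((p + sub.length : ℕ) : Int) := by push_cast; ring
  rw [hcast, pv_seg_nat] at hseg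
  have h2 : p + sub.length - p = sub.length := by omega
  rw [h2] at hseg
  rw [List.prefix_iff_eq_take]
  exact hseg.symm

theorem pv_occs_conv {w sub : List Char} {p : ℕ} (hsub : sub ≠ []) (h : sub <+: w.drop p) :
    p ∈ pvOccs w sub := by
  have hlen := pv_occ_len h hsub
  have hlp : 0 < sub.length := List.length_pos_iff.mpr hsub
  apply pv_occs_mem.mpr
  refine ⟨by omega, ?_⟩
  have hcast : ((p : Int) + (sub.length : Int)) = ((p + sub.length : ℕ) : Int) := by push_cast; ring
  rw [hcast]
  exact pv_seg_of_occ h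

theorem pv_occs_sorted (w sub : List Char) : (pvOccs w sub).Pairwise (· < ·) :=
  List.Pairwise.filter _ List.pairwise_lt_range

theorem pv_filter_le_eq {l : List ℕ} {t : ℕ} (hs : l.Pairwise (· < ·)) (ht : t ∈ l) :
    l.filter (fun p => t ≤ p) = t :: l.filter (fun p => t + 1 ≤ p) := by
  induction l with
  | nil => cases ht
  | cons a l' ih =>
    rw [List.pairwise_cons] at hs
    rcases List.mem_cons.mp ht with h | h
    · subst h
      rw [List.filter_cons, List.filter_cons]
      have h1 : (decide (t ≤ t)) = true := by simp
      have h2 : ¬ ((decide (t + 1 ≤ t)) = true) := by simp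
      simp only [h1, if_true, h2, if_false]
      congr 1
      apply List.filter_congr
      intro x hx
      have := hs.1 x hx
      simp only [decide_eq_decide]
      omega
    · have hat : a < t := hs.1 t h
      rw [List.filter_cons, List.filter_cons]
      have h1 : ¬ ((decide (t ≤ a)) = true) := by simp; omega
      have h2 : ¬ ((decide (t + 1 ≤ a)) = true) := by simp; omega
      simp only [h1, if_false, h2]
      exact ih hs.2 h

theorem pv_filter_notmem {l : List ℕ} {t : ℕ} (ht : t ∉ l) :
    l.filter (fun p => t ≤ p) = l.filter (fun p => t + 1 ≤ p) := by
  apply List.filter_congr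
  intro x hx
  have hxt : x ≠ t := fun h => ht (h ▸ hx)
  simp only [decide_eq_decide]
  omega

theorem pv_gr_skip (L : Int) (hL : 1 ≤ L) :
    ∀ (l : List ℕ) (c : Int) (T : Int) (tt : ℕ), (tt : Int) ≤ T →
      List.foldl (pvGrN L) (c, T) (l.filter (fun p => tt ≤ p)) = List.foldl (pvGrN L) (c, T) l := by
  intro l
  induction l with
  | nil => intro c T tt _; rfl
  | cons p t ih =>
    intro c T tt htt
    by_cases hp : tt ≤ p
    · rw [List.filter_cons, if_pos (by simpa using hp), List.foldl_cons, List.foldl_cons]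
      unfold pvGrN pvGr
      split
      · apply ih
        push_cast
        omega
      · exact ih c T tt htt
    · rw [List.filter_cons, if_neg (by simpa using hp), List.foldl_cons]
      have hstep : pvGrN L (c, T) p = (c, T) := by
        unfold pvGrN pvGr
        rw [if_neg]
        push_cast
        omega
      rw [hstep]
      exact ih c T tt htt

theorem pv_gr_eqt (L : Int) (l : List ℕ) (c : Int) (T T' : Int)
    (h : ∀ p ∈ l, T ≤ (p : Int) ∧ T' ≤ (p : Int)) :
    (List.foldl (pvGrN L) (c, T) l).1 = (List.foldl (pvGrN L) (c, T') l).1 := by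
  cases l with
  | nil => rfl
  | cons p t =>
    have hp := h p (by simp)
    rw [List.foldl_cons, List.foldl_cons]
    unfold pvGrN pvGr
    rw [if_pos (by omega), if_pos (by omega)]

theorem pv_gr_go (w sub : List Char) (hsub : sub ≠ []) :
    ∀ (d t : ℕ) (c : Int), w.length - t = d → t ≤ w.length →
      (List.foldl (pvGrN (sub.length : Int)) (c, (t : Int))
          ((pvOccs w sub).filter (fun p => t ≤ p))).1
        = c + (PySem.Chars.count.go sub (w.length - t) (w.drop t) 0 : Int) := by
  intro d
  induction d using Nat.strong_induction_on with
  | _ d ih =>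
    intro t c hd ht
    have hsl : 1 ≤ sub.length := by
      cases sub with
      | nil => exact absurd rfl hsub
      | cons x xs => simp
    by_cases hocc : t ∈ pvOccs w sub
    · -- an occurrence starts at t: consume it and jump to t + sub.length
      have hpre : sub <+: w.drop t := pv_occs_occ hocc
      have hbound : t + sub.length ≤ w.length := pv_occ_len hpre hsub
      rw [pv_filter_le_eq (pv_occs_sorted w sub) hocc, List.foldl_cons]
      have hstep : pvGrN (sub.length : Int) (c, (t : Int)) t = (c + 1, ((t + sub.length : ℕ) : Int)) := by
        unfold pvGrN pvGr
        rw [if_pos (le_refl _)]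
        push_cast
        rfl
      rw [hstep]
      have hskip1 := pv_gr_skip (sub.length : Int) (by exact_mod_cast hsl)
        (pvOccs w sub) (c + 1) ((t + sub.length : ℕ) : Int) (t + 1) (by push_cast; omega)
      have hskip2 := pv_gr_skip (sub.length : Int) (by exact_mod_cast hsl)
        (pvOccs w sub) (c + 1) ((t + sub.length : ℕ) : Int) (t + sub.length) (by push_cast; omega)
      rw [hskip1, ← hskip2]
      have hrec := ih (w.length - (t + sub.length)) (by omega) (t + sub.length) (c + 1) rfl (by omega)
      rw [hrec]
      -- now compute the go side at t
      have htn : t < w.length := by omega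
      have hdt : w.length - t = (w.length - t - 1) + 1 := by omega
      rcases hdrop : w.drop t with _ | ⟨hd0, tl0⟩
      · exfalso
        have := congrArg List.length hdrop
        rw [List.length_drop] at this
        simp at this
        omega
      · rw [hdt, pv_go_cons]
        rw [if_pos (List.isPrefixOf_iff_prefix.mpr (hdrop ▸ hpre))]
        have hdd : List.drop sub.length (hd0 :: tl0) = w.drop (t + sub.length) := by
          rw [← hdrop, List.drop_drop, Nat.add_comm]
        rw [hdd]
        rw [pv_go_acc sub _ _ 1]
        have hfuel : PySem.Chars.count.go sub (w.length - t - 1) (w.drop (t + sub.length)) 0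
            = PySem.Chars.count.go sub (w.length - (t + sub.length)) (w.drop (t + sub.length)) 0 := by
          exact pv_go_fuel sub hsub (w.length - t - 1) (w.length - (t + sub.length))
            (w.drop (t + sub.length)) 0 (by rw [List.length_drop]; omega)
            (by rw [List.length_drop])
        rw [hfuel]
        push_cast
        ring
    · by_cases htn : t < w.length
      · -- no occurrence at t: move to t + 1
        rw [pv_filter_notmem hocc]
        have heqt : (List.foldl (pvGrN (sub.length : Int)) (c, (t : Int))
              ((pvOccs w sub).filter (fun p => t + 1 ≤ p))).1
            = (List.foldl (pvGrN (sub.length : Int)) (c, ((t + 1 : ℕ) : Int))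
              ((pvOccs w sub).filter (fun p => t + 1 ≤ p))).1 := by
          apply pv_gr_eqt
          intro p hp
          rw [List.mem_filter] at hp
          have := of_decide_eq_true hp.2
          constructor <;> push_cast <;> omega
        rw [heqt]
        have hrec := ih (w.length - (t + 1)) (by omega) (t + 1) c rfl (by omega)
        rw [hrec]
        -- go side: no match at t
        have hdt : w.length - t = (w.length - t - 1) + 1 := by omega
        rcases hdrop : w.drop t with _ | ⟨hd0, tl0⟩
        · exfalso
          have := congrArg List.length hdrop
          rw [List.length_drop] at this
          simp at this
          omega
        · rw [hdt, pv_go_cons]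
          rw [if_neg]
          · have htl : tl0 = w.drop (t + 1) := by
              have := congrArg List.tail hdrop
              rw [List.tail_drop] at this
              simpa using this.symm
            rw [htl]
            have : w.length - t - 1 = w.length - (t + 1) := by omega
            rw [this]
          · intro hpf
            have hpre : sub <+: w.drop t := hdrop ▸ List.isPrefixOf_iff_prefix.mp hpf
            exact hocc (pv_occs_conv hsub hpre)
      · -- t = w.length: nothing left
        have htw : t = w.length := by omega
        have hnil : (pvOccs w sub).filter (fun p => t ≤ p) = [] := by
          rw [List.filter_eq_nil_iff]
          intro p hp
          have hpre := pv_occs_occ hp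
          have := pv_occ_len hpre hsub
          simp only [decide_eq_true_eq]
          omega
        rw [hnil]
        have : w.length - t = 0 := by omega
        rw [this, pv_go_zero]
        simp

theorem pv_count_eq (w sub : List Char) (hsub : sub ≠ []) :
    (List.foldl (pvGrN (sub.length : Int)) ((0 : Int), (0 : Int)) (pvOccs w sub)).1
      = ((PySem.Chars.count w sub : ℕ) : Int) := by
  have h0 := pv_gr_go w sub hsub (w.length) 0 0 rfl (by omega)
  have hfilter : (pvOccs w sub).filter (fun p => 0 ≤ p) = pvOccs w sub := by
    apply List.filter_eq_self.mpr
    intro p _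
    simp
  rw [hfilter] at h0
  have hcount : PySem.Chars.count w sub = PySem.Chars.count.go sub w.length w 0 := by
    unfold PySem.Chars.count
    rw [if_neg]
    simp [hsub]
  rw [hcount]
  simpa using h0

/-! ### Ordered deduplication keeps first-occurrence order -/

theorem pv_ofl_cat {α : Type} [BEq α] (ys : List α) (x : α) :
    PySem.Set.ofList (ys ++ [x]) = PySem.Set.add (PySem.Set.ofList ys) x := by
  unfold PySem.Set.ofList
  rw [List.foldl_append]
  rfl

theorem pv_contains_iff {α : Type} [BEq α] [LawfulBEq α] (l : List α) (x : α) :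
    PySem.Set.contains l x = true ↔ x ∈ l := by
  unfold PySem.Set.contains
  simp

theorem pv_ofl_pairwise_gen {α : Type} [BEq α] [LawfulBEq α] (xs : List α) (g : α → ℕ)
    (Hmin : ∀ (k : ℕ) (hk : k < xs.length), g xs[k] ≤ k)
    (Hocc : ∀ a ∈ xs, g a < xs.length ∧ xs[g a]? = some a) :
    List.Pairwise (fun a b => g a < g b) (PySem.Set.ofList xs) := by
  induction xs using List.reverseRecOn with
  | nil => simp [PySem.Set.ofList, PySem.Set.empty]
  | append_singleton ys x ih =>
    -- restricted hypotheses for ys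
    have Hmin' : ∀ (k : ℕ) (hk : k < ys.length), g ys[k] ≤ k := by
      intro k hk
      have h1 : (ys ++ [x])[k]'(by simp; omega) = ys[k] := by
        rw [List.getElem_append_left hk]
      have := Hmin k (by simp; omega)
      rwa [h1] at this
    have Hboundys : ∀ a ∈ ys, g a < ys.length := by
      intro a ha
      obtain ⟨k, hk, hak⟩ := List.getElem_of_mem ha
      have hmk := Hmin' k hk
      rw [hak] at hmk
      omega
    have Hocc' : ∀ a ∈ ys, g a < ys.length ∧ ys[g a]? = some a := by
      intro a ha
      have hb := Hboundys a ha
      refine ⟨hb, ?_⟩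
      have hfull := Hocc a (by simp [ha])
      have h2 : (ys ++ [x])[g a]? = ys[g a]? := List.getElem?_append_left hb
      rw [h2] at hfull
      exact hfull.2
    have hpw := ih Hmin' Hocc'
    rw [pv_ofl_cat]
    unfold PySem.Set.add
    by_cases hc : PySem.Set.contains (PySem.Set.ofList ys) x = true
    · rw [if_pos hc]
      exact hpw
    · rw [if_neg hc]
      have hxnotin : x ∉ PySem.Set.ofList ys := fun h => hc ((pv_contains_iff _ x).mpr h)
      have hxnotys : x ∉ ys := fun h => hxnotin ((PySem.Set.mem_ofList ys x).mpr h)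
      rw [List.pairwise_append]
      refine ⟨hpw, by simp, ?_⟩
      intro a ha b hb
      have hbx : b = x := by simpa using hb
      rw [hbx]
      have hays : a ∈ ys := (PySem.Set.mem_ofList ys a).mp ha
      have hga : g a < ys.length := Hboundys a hays
      -- g x = ys.length
      have hgx : g x = ys.length := by
        have hx1 := Hmin ys.length (by simp)
        have hx2 : (ys ++ [x])[ys.length]'(by simp) = x := by
          rw [List.getElem_append_right (le_refl _)]
          simp
        rw [hx2] at hx1
        rcases lt_or_eq_of_le hx1 with hlt | heq
        · exfalso
          have hfull := Hocc x (by simp)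
          have h2 : (ys ++ [x])[g x]? = ys[g x]? := List.getElem?_append_left hlt
          rw [h2] at hfull
          have : x ∈ ys := by
            have := hfull.2
            exact List.mem_of_getElem? this
          exact hxnotys this
        · exact heq
      omega

theorem pv_ofl_win (w : List Char) (l : ℕ) (hl : 1 ≤ l) (hn : l ≤ w.length) :
    List.Pairwise (fun a b => pvFpos w a < pvFpos w b) (PySem.Set.ofList (pvWinN w l)) := by
  apply pv_ofl_pairwise_gen (pvWinN w l) (pvFpos w)
  · intro k hk
    have hlen : (pvWinN w l).length = w.length - l + 1 := by
      unfold pvWinN; simp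
    have hkn : k < w.length - l + 1 := by omega
    have hget : (pvWinN w l)[k] = pvSeg w (k : Int) ((k : Int) + (l : Int)) := by
      unfold pvWinN
      simp
    rw [hget]
    have hcast : ((k : Int) + (l : Int)) = ((k + l : ℕ) : Int) := by push_cast; ring
    rw [hcast]
    have hprops := pv_seg_props w k (k + l) (by omega) (by omega)
    exact pv_fpos_le hprops.2.1
  · intro a ha
    have hprops := pv_win_props hl hn ha
    have hocc := pv_fpos_occ hprops.2.2
    have hbound := pv_occ_len hocc hprops.2.1
    have hlen : (pvWinN w l).length = w.length - l + 1 := by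
      unfold pvWinN; simp
    have hfa : pvFpos w a < w.length - l + 1 := by
      have h1 := hprops.1
      omega
    refine ⟨by omega, ?_⟩
    rw [List.getElem?_eq_getElem (by omega)]
    congr 1
    unfold pvWinN
    simp only [List.getElem_map, List.getElem_range]
    have hcast : ((pvFpos w a : Int) + (l : Int)) = ((pvFpos w a + l : ℕ) : Int) := by
      push_cast; ring
    rw [hcast, ← hprops.1]
    exact pv_seg_of_occ hocc

/-! ### B's per-length dictionary: distinct windows with their position lists -/

theorem pv_dict_items (w : List Char) (l : ℕ) (hl : 1 ≤ l) (hn : l ≤ w.length) :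
    (pvBdict w (l : Int)).items
      = (PySem.Set.ofList (pvWinN w l)).map
          (fun k => (k, (pvOccs w k).map (fun i : ℕ => (i : Int)))) := by
  have hrange : PySem.List.pyRange 0 ((w.length : Int) - (l : Int) + 1)
      = (List.range (w.length - l + 1)).map (fun i : ℕ => (i : Int)) := by
    have hc : (w.length : Int) - (l : Int) + 1 = ((w.length - l + 1 : ℕ) : Int) := by omega
    rw [hc, PySem.List.pyRange_zero_natCast]
  unfold pvBdict
  rw [hrange, List.foldl_map]
  have hpair : (List.foldl (fun (d : PySem.Dict (List Char) (List Int)) (i : ℕ) =>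
        d.modify (PySem.List.slice w (some (i : Int)) (some ((i : Int) + (l : Int)))) []
          (fun v => v ++ [(i : Int)])) PySem.Dict.empty (List.range (w.length - l + 1)))
      = List.foldl (fun (d : PySem.Dict (List Char) (List Int)) p =>
          d.modify p.1 [] (fun v => v ++ [p.2])) PySem.Dict.empty
        ((List.range (w.length - l + 1)).map
          (fun i : ℕ => (pvSeg w (i : Int) ((i : Int) + (l : Int)), (i : Int)))) := by
    rw [List.foldl_map]
    rfl
  rw [hpair]
  set PL := (List.range (w.length - l + 1)).map
    (fun i : ℕ => (pvSeg w (i : Int) ((i : Int) + (l : Int)), (i : Int))) with hPL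
  have hkeys : (List.foldl (fun (d : PySem.Dict (List Char) (List Int)) p =>
        d.modify p.1 [] (fun v => v ++ [p.2])) PySem.Dict.empty PL).keys
      = PySem.Set.ofList (pvWinN w l) := by
    have h := PySem.Dict.keys_foldl_modify_key PL (fun p => p.1) ([] : List Int)
      (fun _ p => (fun v => v ++ [p.2])) PySem.Dict.empty
    rw [h]
    have hmk : PL.map (fun p => p.1) = pvWinN w l := by
      rw [hPL, List.map_map]
      rfl
    rw [hmk]
    rfl
  have hnodup : (List.foldl (fun (d : PySem.Dict (List Char) (List Int)) p =>
        d.modify p.1 [] (fun v => v ++ [p.2])) PySem.Dict.empty PL).keys.Nodup := by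
    apply PySem.Dict.nodup_keys_foldl_modify_key
    simp [PySem.Dict.keys, PySem.Dict.empty]
  rw [PySem.Dict.items_eq_map_keys _ hnodup ([] : List Int), hkeys]
  apply List.map_congr_left
  intro k hk
  have hkwin : k ∈ pvWinN w l := (PySem.Set.mem_ofList _ k).mp hk
  have hklen : k.length = l := (pv_win_props hl hn hkwin).1
  congr 1
  rw [PySem.Dict.getD_foldl_modify_append PL PySem.Dict.empty k]
  have hempty : PySem.Dict.empty.getD k ([] : List Int) = [] := rfl
  rw [hempty, List.nil_append, hPL, List.filter_map, List.map_map]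
  unfold pvOccs
  rw [hklen]
  rfl

/-! ### Both phase-1 loops are the same keyed fold over flattened candidate lists -/

theorem pv_Abody_eq (w : List Char) (i j : Int) (st : Int × List Char) (hst : 0 ≤ st.1) :
    pvAinner w i st j = pvGstep pvKeyA st (pvCandA w i j) := by
  unfold pvAinner pvGstep
  show (if _ then ((((PySem.Chars.count w (PySem.List.slice w (some i) (some j)) : ℕ)) : Int),
      PySem.List.slice w (some i) (some j)) else st) = _
  have hiff : ((((PySem.Chars.count w (PySem.List.slice w (some i) (some j)) : ℕ)) : Int) > st.1 ∨
        ((((PySem.Chars.count w (PySem.List.slice w (some i) (some j)) : ℕ)) : Int) ≥ st.1 ∧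
          (PySem.List.slice w (some i) (some j)).length > st.2.length))
      ↔ pvKeyA st < pvKeyA (pvCandA w i j) := by
    unfold pvKeyA pvCandA pvSeg
    simp only [pv_lex_lt, Int.toNat_natCast]
    omega
  rw [if_congr hiff rfl rfl]
  rfl

theorem pv_A_inner (w : List Char) (i : Int) (b : Int × List Char) (hb : 0 ≤ b.1) :
    ((PySem.List.pyRange (i + 1) ((w.length : Int) + 1)).foldl (pvAinner w i) b
      = List.foldl (pvGstep pvKeyA) b
          ((PySem.List.pyRange (i + 1) ((w.length : Int) + 1)).map (fun j => pvCandA w i j)))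
    ∧ 0 ≤ ((PySem.List.pyRange (i + 1) ((w.length : Int) + 1)).foldl (pvAinner w i) b).1 := by
  have h := pv_foldl_congr_inv (fun st : Int × List Char => 0 ≤ st.1)
    (pvAinner w i) (fun st j => pvGstep pvKeyA st (pvCandA w i j))
    (PySem.List.pyRange (i + 1) ((w.length : Int) + 1)) b hb ?_
  · refine ⟨?_, h.2⟩
    rw [h.1, List.foldl_map]
  · intro st j _ hst
    refine ⟨pv_Abody_eq w i j st hst, ?_⟩
    rw [pv_Abody_eq w i j st hst]
    unfold pvGstep
    split
    · simp [pvCandA]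
    · exact hst

theorem pv_A_phase1 (w : List Char) : find_max_substring w = (pvStA w).2 := by
  unfold find_max_substring pvStA
  congr 1
  show (PySem.List.pyRange 0 (w.length : Int)).foldl
      (fun st i => (PySem.List.pyRange (i + 1) ((w.length : Int) + 1)).foldl (pvAinner w i) st)
      ((0 : Int), ([] : List Char)) = _
  have h := pv_foldl_congr_inv (fun st : Int × List Char => 0 ≤ st.1)
    (fun st i => (PySem.List.pyRange (i + 1) ((w.length : Int) + 1)).foldl (pvAinner w i) st)
    (fun st i => List.foldl (pvGstep pvKeyA) st
      ((PySem.List.pyRange (i + 1) ((w.length : Int) + 1)).map (fun j => pvCandA w i j)))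
    (PySem.List.pyRange 0 (w.length : Int)) ((0 : Int), ([] : List Char)) (by norm_num) ?_
  · rw [h.1, pv_foldl_flat]
    rfl
  · intro b i _ hb
    exact ⟨(pv_A_inner w i b hb).1, (pv_A_inner w i b hb).2⟩

theorem pv_Bitem_eq (w : List Char) (l : ℕ) (hl : 1 ≤ l) (hn : l ≤ w.length)
    (k : List Char) (hk : k ∈ pvWinN w l) (st : List Char × Int) (hst : 0 ≤ st.2) :
    pvBitem (l : Int) st (k, (pvOccs w k).map (fun i : ℕ => (i : Int)))
      = pvGstep pvKeyB st (pvCandB w k) := by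
  have hprops := pv_win_props hl hn hk
  have hklen : k.length = l := hprops.1
  have hkne : k ≠ [] := hprops.2.1
  unfold pvBitem
  have hc : ((pvOccs w k).map (fun i : ℕ => (i : Int))).foldl
      (fun (cn : Int × Int) p => if p ≥ cn.2 then (cn.1 + 1, p + (l : Int)) else cn)
      ((0 : Int), (0 : Int))
      = List.foldl (pvGrN (k.length : Int)) ((0 : Int), (0 : Int)) (pvOccs w k) := by
    rw [List.foldl_map, hklen]
    rfl
  show (if _ then _ else st) = _
  rw [hc, pv_count_eq w k hkne]
  unfold pvGstep
  have hiff : (((PySem.Chars.count w k : ℕ) : Int) > st.2 ∨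
        (((PySem.Chars.count w k : ℕ) : Int) = st.2 ∧ (l : Int) > (st.1.length : Int)))
      ↔ pvKeyB st < pvKeyB (pvCandB w k) := by
    unfold pvKeyB pvCandB
    simp only [pv_lex_lt, Int.toNat_natCast]
    omega
  rw [if_congr hiff rfl rfl]
  rfl

theorem pv_B_inner (w : List Char) (l : ℕ) (hl : 1 ≤ l) (hn : l ≤ w.length)
    (b : List Char × Int) (hb : 0 ≤ b.2) :
    ((pvBdict w (l : Int)).items.foldl (pvBitem (l : Int)) b
      = List.foldl (pvGstep pvKeyB) b ((PySem.Set.ofList (pvWinN w l)).map (pvCandB w)))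
    ∧ 0 ≤ ((pvBdict w (l : Int)).items.foldl (pvBitem (l : Int)) b).2 := by
  rw [pv_dict_items w l hl hn, List.foldl_map, List.foldl_map]
  have h := pv_foldl_congr_inv (fun st : List Char × Int => 0 ≤ st.2)
    (fun st k => pvBitem (l : Int) st (k, (pvOccs w k).map (fun i : ℕ => (i : Int))))
    (fun st k => pvGstep pvKeyB st (pvCandB w k))
    (PySem.Set.ofList (pvWinN w l)) b hb ?_
  · exact h
  · intro st k hkmem hst
    dsimp only
    have hkwin : k ∈ pvWinN w l := (PySem.Set.mem_ofList _ k).mp hkmem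
    refine ⟨pv_Bitem_eq w l hl hn k hkwin st hst, ?_⟩
    rw [pv_Bitem_eq w l hl hn k hkwin st hst]
    unfold pvGstep
    split
    · simp [pvCandB]
    · exact hst

theorem pv_B_phase1 (w : List Char) :
    (PySem.List.pyRange 1 ((w.length : Int) + 1)).foldl
      (fun st L => (pvBdict w L).items.foldl (pvBitem L) st)
      (([] : List Char), (0 : Int))
    = pvStB w := by
  unfold pvStB
  have h := pv_foldl_congr_inv (fun st : List Char × Int => 0 ≤ st.2)
    (fun st L => (pvBdict w L).items.foldl (pvBitem L) st)
    (fun st L => List.foldl (pvGstep pvKeyB) st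
      ((PySem.Set.ofList (pvWinN w L.toNat)).map (pvCandB w)))
    (PySem.List.pyRange 1 ((w.length : Int) + 1)) (([] : List Char), (0 : Int))
    (by norm_num) ?_
  · rw [h.1, pv_foldl_flat]
    rfl
  · intro b L hL hb
    rw [PySem.List.mem_pyRange_one] at hL
    have hcast : ((L.toNat : ℕ) : Int) = L := by omega
    have h1 : 1 ≤ L.toNat := by omega
    have h2 : L.toNat ≤ w.length := by omega
    have hb1 := pv_B_inner w L.toNat h1 h2 b hb
    rw [hcast] at hb1
    exact hb1

/-! ### Characterising the winner on each side -/

theorem pv_cand_occ (w : List Char) {i j : Int} (h0 : 0 ≤ i) (hij : i < j)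
    (hjn : j ≤ (w.length : Int)) :
    (pvCandA w i j).2 <+: w.drop i.toNat ∧ (pvCandA w i j).2 ≠ [] ∧
    pvKeyA (pvCandA w i j) = pvKap w (pvCandA w i j).2 := by
  have hi : i = ((i.toNat : ℕ) : Int) := by omega
  have hj : j = ((j.toNat : ℕ) : Int) := by omega
  have hprops := pv_seg_props w i.toNat j.toNat (by omega) (by omega)
  constructor
  · show pvSeg w i j <+: _
    rw [hi, hj]
    exact hprops.2.1
  constructor
  · show pvSeg w i j ≠ []
    rw [hi, hj]
    exact hprops.2.2
  · exact pv_keyA_cand w i j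

theorem pv_A_decode (w : List Char) (hw : w ≠ []) : pvStA w ∈ pvLA w := by
  have hn : 1 ≤ w.length := by
    cases w with
    | nil => exact absurd rfl hw
    | cons a t => simp
  have hmem := pv_g_mem pvKeyA (pvLA w) ((0 : Int), ([] : List Char))
  rcases List.mem_cons.mp hmem with h | h
  · exfalso
    have he : pvCandA w 0 (w.length : Int) ∈ pvLA w := by
      apply pv_LA_mem.mpr
      exact ⟨0, (w.length : Int), le_refl _, by exact_mod_cast hn, le_refl _, rfl⟩
    have hle := pv_g_max pvKeyA (pvLA w) ((0 : Int), ([] : List Char)) he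
    rw [show List.foldl (pvGstep pvKeyA) ((0 : Int), ([] : List Char)) (pvLA w) = pvStA w from rfl] at hle
    rw [show pvStA w = ((0 : Int), ([] : List Char)) from h] at hle
    have hkey : pvKeyA (pvCandA w 0 (w.length : Int))
        = toLex (PySem.Chars.count w (pvSeg w 0 (w.length : Int)), (pvSeg w 0 (w.length : Int)).length) :=
      pv_keyA_cand w 0 (w.length : Int)
    have hseg : pvSeg w 0 (w.length : Int) = w := by
      have h0 : (0 : Int) = ((0 : ℕ) : Int) := rfl
      rw [h0, pv_seg_nat]
      simp
    rw [hkey, hseg] at hle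
    have hinit : pvKeyA ((0 : Int), ([] : List Char)) = toLex (0, 0) := by
      unfold pvKeyA
      simp
    rw [hinit] at hle
    rw [pv_lex_le] at hle
    omega
  · exact h

theorem pv_A_props (w : List Char) (hw : w ≠ []) :
    (pvStA w).2 ≠ [] ∧ (pvStA w).2 <:+: w ∧ pvKeyA (pvStA w) = pvKap w (pvStA w).2 := by
  rcases pv_LA_mem.mp (pv_A_decode w hw) with ⟨i, j, h0, hij, hjn, heq⟩
  have hocc := pv_cand_occ w h0 hij hjn
  rw [heq]
  exact ⟨hocc.2.1, pv_occ_infix hocc.1, hocc.2.2⟩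

theorem pv_A_max (w : List Char) (hw : w ≠ []) (s : List Char) (hs : s ≠ []) (hsub : s <:+: w) :
    pvKap w s ≤ pvKap w (pvStA w).2 := by
  have hocc := pv_fpos_occ hsub
  have hbound := pv_occ_len hocc hs
  have hlp : 0 < s.length := List.length_pos_iff.mpr hs
  have he : pvCandA w ((pvFpos w s : ℕ) : Int) (((pvFpos w s + s.length : ℕ) : ℕ) : Int) ∈ pvLA w := by
    apply pv_LA_mem.mpr
    refine ⟨_, _, by positivity, by exact_mod_cast (by omega : pvFpos w s < pvFpos w s + s.length),
      by exact_mod_cast hbound, rfl⟩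
  have hle := pv_g_max pvKeyA (pvLA w) ((0 : Int), ([] : List Char)) he
  have hkey : pvKeyA (pvCandA w ((pvFpos w s : ℕ) : Int) ((pvFpos w s + s.length : ℕ) : Int))
      = pvKap w s := by
    rw [pv_keyA_cand, pv_seg_of_occ hocc]
  rw [hkey] at hle
  have hA := (pv_A_props w hw).2.2
  rw [show List.foldl (pvGstep pvKeyA) ((0 : Int), ([] : List Char)) (pvLA w) = pvStA w from rfl,
    hA] at hle
  exact hle

theorem pv_A_first (w : List Char) (hw : w ≠ []) (s : List Char) (hs : s ≠ []) (hsub : s <:+: w)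
    (hkey : pvKap w s = pvKap w (pvStA w).2) :
    pvFpos w (pvStA w).2 ≤ pvFpos w s := by
  have hocc := pv_fpos_occ hsub
  have hbound := pv_occ_len hocc hs
  have hlp : 0 < s.length := List.length_pos_iff.mpr hs
  set f := pvFpos w s with hf
  set p : Int := ((f : ℕ) : Int) with hp
  set q : Int := (((f + s.length : ℕ) : ℕ) : Int) with hq
  have hpq : p < q := by rw [hp, hq]; exact_mod_cast (by omega : f < f + s.length)
  have hqn : q ≤ (w.length : Int) := by rw [hq]; exact_mod_cast hbound
  have h0p : 0 ≤ p := by positivity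
  -- split the candidate list at the pair (f, f + |s|)
  have e1 : PySem.List.pyRange 0 (w.length : Int)
      = PySem.List.pyRange 0 p ++ p :: PySem.List.pyRange (p + 1) (w.length : Int) := by
    have ec : PySem.List.pyRange p (w.length : Int)
        = p :: PySem.List.pyRange (p + 1) (w.length : Int) :=
      PySem.List.pyRange_one_cons (a := p) (b := (w.length : Int)) (by omega)
    rw [PySem.List.pyRange_one_append 0 p (w.length : Int) h0p (by omega), ec]
  have e2 : PySem.List.pyRange (p + 1) ((w.length : Int) + 1)
      = PySem.List.pyRange (p + 1) q ++ q :: PySem.List.pyRange (q + 1) ((w.length : Int) + 1) := by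
    have ec : PySem.List.pyRange q ((w.length : Int) + 1)
        = q :: PySem.List.pyRange (q + 1) ((w.length : Int) + 1) :=
      PySem.List.pyRange_one_cons (a := q) (b := (w.length : Int) + 1) (by omega)
    rw [PySem.List.pyRange_one_append (p + 1) q ((w.length : Int) + 1) (by omega) (by omega), ec]
  have hsplit : pvLA w
      = ((PySem.List.pyRange 0 p).flatMap (fun i =>
            (PySem.List.pyRange (i + 1) ((w.length : Int) + 1)).map (fun j => pvCandA w i j))
          ++ (PySem.List.pyRange (p + 1) q).map (fun j => pvCandA w p j))
        ++ pvCandA w p q ::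
          ((PySem.List.pyRange (q + 1) ((w.length : Int) + 1)).map (fun j => pvCandA w p j)
            ++ (PySem.List.pyRange (p + 1) (w.length : Int)).flatMap (fun i =>
              (PySem.List.pyRange (i + 1) ((w.length : Int) + 1)).map (fun j => pvCandA w i j))) := by
    unfold pvLA
    rw [e1, List.flatMap_append, List.flatMap_cons, e2, List.map_append, List.map_cons]
    simp [List.append_assoc]
  have hxkey : pvKeyA (pvCandA w p q) = pvKap w s := by
    rw [pv_keyA_cand, hp, hq, pv_seg_of_occ hocc]
  have hstkey : pvKeyA (pvStA w) = pvKap w (pvStA w).2 := (pv_A_props w hw).2.2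
  have hfirst := pv_g_first pvKeyA ((0 : Int), ([] : List Char)) (pvCandA w p q) _ _
    (by rw [← hsplit]
        show pvKeyA (pvStA w) ≤ _
        rw [hstkey, hxkey, ← hkey])
  rw [← hsplit] at hfirst
  have hst : pvStA w = pvGstep pvKeyA (List.foldl (pvGstep pvKeyA) ((0 : Int), ([] : List Char))
      (((PySem.List.pyRange 0 p).flatMap (fun i =>
          (PySem.List.pyRange (i + 1) ((w.length : Int) + 1)).map (fun j => pvCandA w i j))
        ++ (PySem.List.pyRange (p + 1) q).map (fun j => pvCandA w p j)))) (pvCandA w p q) := hfirst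
  by_cases hlt : pvKeyA (List.foldl (pvGstep pvKeyA) ((0 : Int), ([] : List Char))
      (((PySem.List.pyRange 0 p).flatMap (fun i =>
          (PySem.List.pyRange (i + 1) ((w.length : Int) + 1)).map (fun j => pvCandA w i j))
        ++ (PySem.List.pyRange (p + 1) q).map (fun j => pvCandA w p j))))
      < pvKeyA (pvCandA w p q)
  · -- the winner is exactly the candidate at (f, f + |s|)
    rw [pv_g_pos pvKeyA hlt] at hst
    rw [hst]
    show pvFpos w (pvSeg w p q) ≤ f
    rw [hp, hq, pv_seg_of_occ hocc]
  · -- the winner was adopted strictly earlier in the enumeration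
    rw [pv_g_neg pvKeyA hlt] at hst
    have hmem := pv_g_mem pvKeyA (((PySem.List.pyRange 0 p).flatMap (fun i =>
        (PySem.List.pyRange (i + 1) ((w.length : Int) + 1)).map (fun j => pvCandA w i j))
      ++ (PySem.List.pyRange (p + 1) q).map (fun j => pvCandA w p j)))
      ((0 : Int), ([] : List Char))
    rw [← hst] at hmem
    rcases List.mem_cons.mp hmem with h | h
    · exfalso
      have h1 : pvKeyA (pvStA w) = toLex (0, 0) := by
        rw [h]; unfold pvKeyA; simp
      rw [hstkey, ← hkey] at h1
      unfold pvKap at h1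
      have := pv_lex_inj h1
      omega
    · rcases List.mem_append.mp h with h | h
      · -- strictly smaller start row
        rw [List.mem_flatMap] at h
        rcases h with ⟨i, hi, h⟩
        rw [List.mem_map] at h
        rcases h with ⟨j, hj, heq⟩
        rw [PySem.List.mem_pyRange_one] at hi hj
        have hocc2 := pv_cand_occ w (i := i) (j := j) (by omega) (by omega) (by omega)
        have hle2 : pvFpos w (pvStA w).2 ≤ i.toNat := by
          rw [heq] at hocc2
          exact pv_fpos_le hocc2.1
        have : i < p := hi.2
        rw [hp] at this
        omega
      · -- same start row, strictly shorter
        rw [List.mem_map] at h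
        rcases h with ⟨j, hj, heq⟩
        rw [PySem.List.mem_pyRange_one] at hj
        have hocc2 := pv_cand_occ w (i := p) (j := j) h0p (by omega) (by omega)
        have hle2 : pvFpos w (pvStA w).2 ≤ p.toNat := by
          rw [heq] at hocc2
          exact pv_fpos_le hocc2.1
        rw [hp] at hle2
        simpa using hle2

theorem pv_B_decode (w : List Char) (hw : w ≠ []) : pvStB w ∈ pvLB w := by
  have hn : 1 ≤ w.length := by
    cases w with
    | nil => exact absurd rfl hw
    | cons a t => simp
  have hmem := pv_g_mem pvKeyB (pvLB w) (([] : List Char), (0 : Int))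
  rcases List.mem_cons.mp hmem with h | h
  · exfalso
    have he : pvCandB w w ∈ pvLB w := by
      apply pv_LB_mem.mpr
      exact ⟨w.length, w, hn, le_refl _, pv_sub_win hw (List.infix_refl w), rfl⟩
    have hle := pv_g_max pvKeyB (pvLB w) (([] : List Char), (0 : Int)) he
    rw [show List.foldl (pvGstep pvKeyB) (([] : List Char), (0 : Int)) (pvLB w) = pvStB w from rfl] at hle
    rw [show pvStB w = (([] : List Char), (0 : Int)) from h] at hle
    rw [pv_keyB_cand] at hle
    have hinit : pvKeyB (([] : List Char), (0 : Int)) = toLex (0, 0) := by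
      unfold pvKeyB; simp
    rw [hinit] at hle
    unfold pvKap at hle
    rw [pv_lex_le] at hle
    omega
  · exact h

theorem pv_B_props (w : List Char) (hw : w ≠ []) :
    (pvStB w).1 ≠ [] ∧ (pvStB w).1 <:+: w ∧ pvKeyB (pvStB w) = pvKap w (pvStB w).1 := by
  rcases pv_LB_mem.mp (pv_B_decode w hw) with ⟨l, k, hl, hn, hk, heq⟩
  have hprops := pv_win_props hl hn hk
  rw [heq]
  exact ⟨hprops.2.1, hprops.2.2, pv_keyB_cand w k⟩

theorem pv_B_max (w : List Char) (hw : w ≠ []) (s : List Char) (hs : s ≠ []) (hsub : s <:+: w) :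
    pvKap w s ≤ pvKap w (pvStB w).1 := by
  have hlp : 0 < s.length := List.length_pos_iff.mpr hs
  have he : pvCandB w s ∈ pvLB w := by
    apply pv_LB_mem.mpr
    exact ⟨s.length, s, hlp, hsub.length_le, pv_sub_win hs hsub, rfl⟩
  have hle := pv_g_max pvKeyB (pvLB w) (([] : List Char), (0 : Int)) he
  rw [show List.foldl (pvGstep pvKeyB) (([] : List Char), (0 : Int)) (pvLB w) = pvStB w from rfl,
    (pv_B_props w hw).2.2, pv_keyB_cand] at hle
  exact hle

theorem pv_B_first (w : List Char) (hw : w ≠ []) (s : List Char) (hs : s ≠ []) (hsub : s <:+: w)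
    (hkey : pvKap w s = pvKap w (pvStB w).1) :
    pvFpos w (pvStB w).1 ≤ pvFpos w s := by
  have hlp : 0 < s.length := List.length_pos_iff.mpr hs
  have hsn : s.length ≤ w.length := hsub.length_le
  have hlensB : (pvStB w).1.length = s.length := by
    unfold pvKap at hkey
    exact ((pv_lex_inj hkey).2).symm
  -- the item list of block |s| around s
  have hwinmem : s ∈ PySem.Set.ofList (pvWinN w s.length) :=
    (PySem.Set.mem_ofList _ s).mpr (pv_sub_win hs hsub)
  obtain ⟨u, v, huv⟩ := List.append_of_mem hwinmem
  have hpw := pv_ofl_win w s.length hlp hsn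
  rw [huv, List.pairwise_append] at hpw
  have hufpos : ∀ b ∈ u, pvFpos w b < pvFpos w s := by
    intro b hb
    exact hpw.2.2 b hb s (by simp)
  -- split the flattened list at the item of s
  have e1 : PySem.List.pyRange 1 ((w.length : Int) + 1)
      = PySem.List.pyRange 1 ((s.length : ℕ) : Int)
        ++ ((s.length : ℕ) : Int) :: PySem.List.pyRange (((s.length : ℕ) : Int) + 1)
          ((w.length : Int) + 1) := by
    have ec : PySem.List.pyRange ((s.length : ℕ) : Int) ((w.length : Int) + 1)
        = ((s.length : ℕ) : Int) :: PySem.List.pyRange (((s.length : ℕ) : Int) + 1)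
          ((w.length : Int) + 1) :=
      PySem.List.pyRange_one_cons (a := ((s.length : ℕ) : Int)) (b := (w.length : Int) + 1)
        (by omega)
    rw [PySem.List.pyRange_one_append 1 ((s.length : ℕ) : Int) ((w.length : Int) + 1)
        (by omega) (by omega), ec]
  have hsplit : pvLB w
      = ((PySem.List.pyRange 1 ((s.length : ℕ) : Int)).flatMap (fun L =>
            (PySem.Set.ofList (pvWinN w L.toNat)).map (pvCandB w))
          ++ u.map (pvCandB w))
        ++ pvCandB w s ::
          (v.map (pvCandB w)
            ++ (PySem.List.pyRange (((s.length : ℕ) : Int) + 1) ((w.length : Int) + 1)).flatMap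
              (fun L => (PySem.Set.ofList (pvWinN w L.toNat)).map (pvCandB w))) := by
    unfold pvLB
    rw [e1, List.flatMap_append, List.flatMap_cons]
    simp only [Int.toNat_natCast]
    rw [huv, List.map_append, List.map_cons]
    simp [List.append_assoc]
  have hstkey : pvKeyB (pvStB w) = pvKap w (pvStB w).1 := (pv_B_props w hw).2.2
  have hfirst := pv_g_first pvKeyB (([] : List Char), (0 : Int)) (pvCandB w s) _ _
    (by rw [← hsplit]
        show pvKeyB (pvStB w) ≤ _
        rw [hstkey, pv_keyB_cand, ← hkey])
  rw [← hsplit] at hfirst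
  by_cases hlt : pvKeyB (List.foldl (pvGstep pvKeyB) (([] : List Char), (0 : Int))
      (((PySem.List.pyRange 1 ((s.length : ℕ) : Int)).flatMap (fun L =>
          (PySem.Set.ofList (pvWinN w L.toNat)).map (pvCandB w)))
        ++ u.map (pvCandB w)))
      < pvKeyB (pvCandB w s)
  · rw [pv_g_pos pvKeyB hlt] at hfirst
    have hsb : pvStB w = pvCandB w s := hfirst
    rw [hsb]
    exact le_refl _
  · rw [pv_g_neg pvKeyB hlt] at hfirst
    have hstB : pvStB w = List.foldl (pvGstep pvKeyB) (([] : List Char), (0 : Int))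
        (((PySem.List.pyRange 1 ((s.length : ℕ) : Int)).flatMap (fun L =>
            (PySem.Set.ofList (pvWinN w L.toNat)).map (pvCandB w)))
          ++ u.map (pvCandB w)) := hfirst
    have hmem := pv_g_mem pvKeyB
      (((PySem.List.pyRange 1 ((s.length : ℕ) : Int)).flatMap (fun L =>
          (PySem.Set.ofList (pvWinN w L.toNat)).map (pvCandB w)))
        ++ u.map (pvCandB w))
      (([] : List Char), (0 : Int))
    rw [← hstB] at hmem
    rcases List.mem_cons.mp hmem with h | h
    · exfalso
      have h1 : pvKeyB (pvStB w) = toLex (0, 0) := by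
        rw [h]; unfold pvKeyB; simp
      rw [hstkey, ← hkey] at h1
      unfold pvKap at h1
      have := pv_lex_inj h1
      omega
    · rcases List.mem_append.mp h with h | h
      · -- a strictly shorter block: impossible, the winner has length |s|
        exfalso
        rw [List.mem_flatMap] at h
        rcases h with ⟨L, hL, h⟩
        rw [List.mem_map] at h
        rcases h with ⟨k, hkmem, heq⟩
        rw [PySem.List.mem_pyRange_one] at hL
        have hkwin : k ∈ pvWinN w L.toNat := (PySem.Set.mem_ofList _ k).mp hkmem
        have hklen : k.length = L.toNat :=
          (pv_win_props (l := L.toNat) (by omega) (by omega) hkwin).1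
        have hsb1 : (pvStB w).1 = k := by rw [← heq]; rfl
        rw [hsb1, hklen] at hlensB
        omega
      · -- an earlier item of the same block: strictly smaller first occurrence
        rw [List.mem_map] at h
        rcases h with ⟨k, hkmem, heq⟩
        have hsb1 : (pvStB w).1 = k := by rw [← heq]; rfl
        rw [hsb1]
        exact le_of_lt (hufpos k hkmem)

/-! ### The two winners coincide -/

theorem pv_best (w : List Char) :
    find_max_substring w
      = ((PySem.List.pyRange 1 ((w.length : Int) + 1)).foldl
          (fun st L => (pvBdict w L).items.foldl (pvBitem L) st)
          (([] : List Char), (0 : Int))).1 := by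
  rw [pv_A_phase1, pv_B_phase1]
  by_cases hw : w = []
  · subst hw
    have hA : pvLA [] = [] := by
      unfold pvLA
      simp [show PySem.List.pyRange 0 ((List.length ([] : List Char)) : Int) = [] from by decide]
    have hB : pvLB [] = [] := by
      unfold pvLB
      simp [show PySem.List.pyRange 1 (((List.length ([] : List Char)) : Int) + 1) = [] from by decide]
    unfold pvStA pvStB
    rw [hA, hB]
    rfl
  · have hApr := pv_A_props w hw
    have hBpr := pv_B_props w hw
    have hAB : pvKap w (pvStA w).2 = pvKap w (pvStB w).1 :=
      le_antisymm (pv_B_max w hw _ hApr.1 hApr.2.1) (pv_A_max w hw _ hBpr.1 hBpr.2.1)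
    have hlen : (pvStA w).2.length = (pvStB w).1.length := by
      unfold pvKap at hAB
      exact (pv_lex_inj hAB).2
    have hf1 : pvFpos w (pvStA w).2 ≤ pvFpos w (pvStB w).1 :=
      pv_A_first w hw _ hBpr.1 hBpr.2.1 hAB.symm
    have hf2 : pvFpos w (pvStB w).1 ≤ pvFpos w (pvStA w).2 :=
      pv_B_first w hw _ hApr.1 hApr.2.1 hAB
    have hf : pvFpos w (pvStA w).2 = pvFpos w (pvStB w).1 := le_antisymm hf1 hf2
    calc (pvStA w).2 = (w.drop (pvFpos w (pvStA w).2)).take (pvStA w).2.length :=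
          pv_sub_canon hApr.2.1
      _ = (w.drop (pvFpos w (pvStB w).1)).take (pvStB w).1.length := by rw [hf, hlen]
      _ = (pvStB w).1 := (pv_sub_canon hBpr.2.1).symm

-- ===== VERDICT (by name: the statement is the Claim_ definition above) =====
theorem find_end_count_spec : Claim_equal_find_end_count := by
  unfold Claim_equal_find_end_count
  intro wr _
  unfold Spec_find_end_count
  have hA : find_end_count wr = pvPhase2 wr.toList (find_max_substring wr.toList) := rfl
  have hB : find_end_count_alt wr
      = pvPhase2 wr.toList (((PySem.List.pyRange 1 ((wr.toList.length : Int) + 1)).foldl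
          (fun st L => (pvBdict wr.toList L).items.foldl (pvBitem L) st)
          (([] : List Char), (0 : Int))).1) := rfl
  rw [hA, hB, pv_best]
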